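-- pv_equiv track=rewrite | github.com/JiyanAtalay/AlgorithmicQuestionsPython | AlgorithmicQuestions/NumbersWithRepeatedDigits.py | FindRepeatedDigits
-- ===== SOURCE A (Python) =====
-- def FindRepeatedDigits(num):
--
--     repeateds = 0
--
--     while True:
--         num = str(num)
--         length = len(num) -1
--         for i in range(0,length):
--             if num[i] == num[i+1]:
--                 repeateds += 1
--
--         num = int(num)
--         num -= 1
--         num = str(num)
--
--         if num == "0":break
--
--     return repeateds
-- ===== SOURCE B (Python) =====
-- def FindRepeatedDigits(num):
--     total = 0
--     pairs = [0] * (num + 1)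
--     for n in range(10, num + 1):
--         q, d = divmod(n, 10)
--         p = pairs[q] + (d == q % 10)
--         pairs[n] = p
--         total += p
--     return total
-- ===== Notes on version B (the rewrite author's own statement) =====
-- stated objective: faster
-- what changed: Instead of re-rendering every number 1..num as a string (str/int round trip per iteration) and scanning its characters, B fills a table bottom-up where the adjacent-equal-pair count of n is pairs[n//10] plus one comparison of the last two digits, so each number costs O(1) amortized instead of O(log n) string work.
-- outside the precondition, e.g. on FindRepeatedDigits(0): A does not finish within the time limit, B returns 0
import Mathlib
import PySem

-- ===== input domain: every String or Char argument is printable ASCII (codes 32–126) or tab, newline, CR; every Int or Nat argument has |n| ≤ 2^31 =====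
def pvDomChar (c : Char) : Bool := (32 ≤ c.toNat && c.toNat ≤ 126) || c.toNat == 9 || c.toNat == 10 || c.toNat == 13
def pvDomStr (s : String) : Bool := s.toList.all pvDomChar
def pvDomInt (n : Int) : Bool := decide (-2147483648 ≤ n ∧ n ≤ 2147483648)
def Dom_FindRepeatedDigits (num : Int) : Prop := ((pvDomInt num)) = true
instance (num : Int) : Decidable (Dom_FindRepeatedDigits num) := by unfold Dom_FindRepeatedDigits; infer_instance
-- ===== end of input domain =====

-- B replaces A's per-number str/int round trip and character scan by a bottom-up table
-- (pairs of n = pairs of n//10 + one last-two-digit comparison); measured faster.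

-- ===== PORT A =====

-- the 'for i in range(0, length)' body of A, counting adjacent equal characters of str(num)
def aCountPairs (s : String) (repeateds : Int) : Int :=
  let cs := s.toList
  (PySem.List.pyRange 0 (PySem.Str.len s - 1) 1).foldl
    (fun r i => if PySem.List.pyGet? cs i = PySem.List.pyGet? cs (i + 1) then r + 1 else r)
    repeateds

-- A's 'while True' loop; fuel = number of iterations still possible (the loop visits
-- num, num-1, …, 1, so num.toNat fuel is exact for num ≥ 1).  For num ≤ 0 the Python loop
-- never terminates — those inputs are excluded by Pre_ — and the port returns the
-- accumulator when fuel runs out.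
def aLoop : Nat → Int → Int → Int
  | 0, _, repeateds => repeateds
  | fuel + 1, num, repeateds =>
    -- num = str(num); length = len(num) - 1; for i in range(0, length): …
    let s := PySem.Int.toStr num
    let repeateds := aCountPairs s repeateds
    -- num = int(num): num is str(v) of the tracked integer v and int(str(v)) = v in Python,
    -- so the tracked integer is unchanged by the parse; then num -= 1; num = str(num)
    let num := num - 1
    -- if num == "0": break
    if PySem.Int.toStr num = "0" then repeateds
    else aLoop fuel num repeateds

def FindRepeatedDigits (num : Int) : Int :=
  aLoop num.toNat num 0

-- ===== PORT B =====

-- loop body of Source B: q, d = divmod(n, 10); p = pairs[q] + (d == q % 10); pairs[n] = p; total += p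
def bStep (st : Int × List Int) (n : Int) : Int × List Int :=
  let q := PySem.Int.floordiv n 10
  let d := PySem.Int.mod n 10
  let p := PySem.List.pyGetD st.2 q 0 + (if d = PySem.Int.mod q 10 then 1 else 0)
  (st.1 + p, PySem.List.pySetD st.2 n p)

def FindRepeatedDigits_alt (num : Int) : Int :=
  -- total = 0; pairs = [0] * (num + 1); for n in range(10, num + 1): …; return total
  ((PySem.List.pyRange 10 (num + 1) 1).foldl bStep
    (0, List.replicate (num + 1).toNat 0)).1

-- ===== PRECONDITION & SPEC =====
-- Pre_ excludes exactly num ≤ 0: there A's loop decrements past 0 and the string never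
-- becomes "0", so Python loops forever (A never returns a value).
def Pre_FindRepeatedDigits (num : Int) : Prop := 1 ≤ num
instance (num : Int) : Decidable (Pre_FindRepeatedDigits num) := by
  unfold Pre_FindRepeatedDigits; infer_instance
def pvWitness_FindRepeatedDigits : Int := 5

def Spec_FindRepeatedDigits (num : Int) (out : Int) : Prop := out = FindRepeatedDigits_alt num
instance (num : Int) (out : Int) : Decidable (Spec_FindRepeatedDigits num out) := by
  unfold Spec_FindRepeatedDigits; infer_instance

-- ===== CLAIM (what is proved, stated in full; the proofs are below) =====
def Claim_equal_FindRepeatedDigits : Prop := ∀ (num : Int), Dom_FindRepeatedDigits num → Pre_FindRepeatedDigits num → Spec_FindRepeatedDigits num (FindRepeatedDigits num)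

-- ===== LEMMAS AND PROOFS =====

-- number of adjacent equal entries of a list (the common value both programs compute,
-- read off the little-endian digit list)
def adjEq : List Nat → Int
  | a :: b :: t => (if a = b then 1 else 0) + adjEq (b :: t)
  | _ => 0

-- adjacent-equal-digit pairs of n (order of the digit list does not matter for the count)
def pc (n : Nat) : Int := adjEq (Nat.digits 10 n)

-- Σ_{k=1}^{n} pc k
def S : Nat → Int
  | 0 => 0
  | n + 1 => S n + pc (n + 1)

theorem adjEq_cons₂ (a b : Nat) (t : List Nat) :
    adjEq (a :: b :: t) = (if a = b then 1 else 0) + adjEq (b :: t) := rfl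

theorem pc_lt10 {n : Nat} (h : n < 10) : pc n = 0 := by
  rcases Nat.eq_zero_or_pos n with h0 | h0
  · subst h0; simp [pc, adjEq]
  · rw [pc, Nat.digits_def' (by norm_num : (1:Nat) < 10) h0,
      Nat.div_eq_of_lt h, Nat.digits_zero]
    simp [adjEq]

theorem pc_ge10 {n : Nat} (h : 10 ≤ n) :
    pc n = pc (n / 10) + (if n % 10 = n / 10 % 10 then 1 else 0) := by
  have h0 : 0 < n := by omega
  have h1 : 0 < n / 10 := Nat.div_pos h (by norm_num)
  have e : pc (n / 10) = adjEq (n / 10 % 10 :: Nat.digits 10 (n / 10 / 10)) := by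
    rw [pc, Nat.digits_def' (by norm_num : (1:Nat) < 10) h1]
  rw [pc, Nat.digits_def' (by norm_num : (1:Nat) < 10) h0,
    Nat.digits_def' (by norm_num : (1:Nat) < 10) h1, adjEq_cons₂, e, add_comm]

theorem S_le9 {n : Nat} (h : n ≤ 9) : S n = 0 := by
  interval_cases n <;> norm_num [S, pc_lt10]

theorem S_succ' {m : Nat} (h : 1 ≤ m) : S m = S (m - 1) + pc m := by
  cases m with
  | zero => omega
  | succ k => simp [S]

-- aCountPairs on the character-list level
def cpChars (cs : List Char) (repeateds : Int) : Int :=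
  (PySem.List.pyRange 0 ((cs.length : Int) - 1) 1).foldl
    (fun r i => if PySem.List.pyGet? cs i = PySem.List.pyGet? cs (i + 1) then r + 1 else r)
    repeateds

theorem aCountPairs_eq (s : String) (rep : Int) : aCountPairs s rep = cpChars s.toList rep := by
  simp [aCountPairs, cpChars, PySem.Str.len_eq]

theorem cpChars_single (c : Char) (rep : Int) : cpChars [c] rep = rep := by
  norm_num [cpChars, PySem.List.pyRange_one_eq_nil]

theorem cpChars_append (ds : List Char) (c : Char) (rep : Int) (h : ds ≠ []) :
    cpChars (ds ++ [c]) rep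
      = (if ds.getLast? = some c then cpChars ds rep + 1 else cpChars ds rep) := by
  have hL : 1 ≤ ds.length := List.length_pos_of_ne_nil h
  unfold cpChars
  have ecast : (ds.length : Int) - 1 = ((ds.length - 1 : Nat) : Int) := by omega
  have hlen : ((ds ++ [c]).length : Int) - 1 = ((ds.length : Nat) : Int) := by
    simp
  rw [hlen, ecast]
  have hsplit : PySem.List.pyRange 0 ((ds.length : Nat) : Int) 1
      = PySem.List.pyRange 0 ((ds.length - 1 : Nat) : Int) 1 ++ [((ds.length - 1 : Nat) : Int)] := by
    have e1 : ((ds.length : Nat) : Int) = ((ds.length - 1 : Nat) : Int) + 1 := by omega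
    rw [e1, PySem.List.pyRange_one_succ_right (by omega)]
  rw [hsplit, List.foldl_append]
  have hpref :
      (PySem.List.pyRange 0 ((ds.length - 1 : Nat) : Int) 1).foldl
        (fun r i => if PySem.List.pyGet? (ds ++ [c]) i = PySem.List.pyGet? (ds ++ [c]) (i + 1) then r + 1 else r) rep
      = (PySem.List.pyRange 0 ((ds.length - 1 : Nat) : Int) 1).foldl
        (fun r i => if PySem.List.pyGet? ds i = PySem.List.pyGet? ds (i + 1) then r + 1 else r) rep := by
    apply PySem.List.foldl_congr_mem
    intro acc x hx
    rw [PySem.List.mem_pyRange_one] at hx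
    have h0 : 0 ≤ x := hx.1
    have h1 : x < ((ds.length - 1 : Nat) : Int) := hx.2
    have e1 : PySem.List.pyGet? (ds ++ [c]) x = PySem.List.pyGet? ds x := by
      rw [PySem.List.pyGet?_of_nonneg _ h0, PySem.List.pyGet?_of_nonneg _ h0,
        List.getElem?_append_left (by omega)]
    have e2 : PySem.List.pyGet? (ds ++ [c]) (x + 1) = PySem.List.pyGet? ds (x + 1) := by
      rw [PySem.List.pyGet?_of_nonneg _ (by omega), PySem.List.pyGet?_of_nonneg _ (by omega),
        List.getElem?_append_left (by omega)]
    rw [e1, e2]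
  rw [hpref]
  simp only [List.foldl_cons, List.foldl_nil]
  have eA : PySem.List.pyGet? (ds ++ [c]) ((ds.length - 1 : Nat) : Int) = ds.getLast? := by
    rw [PySem.List.pyGet?_natCast, List.getElem?_append_left (by omega),
      List.getLast?_eq_getElem?]
  have eB : PySem.List.pyGet? (ds ++ [c]) (((ds.length - 1 : Nat) : Int) + 1) = some c := by
    have e1 : ((ds.length - 1 : Nat) : Int) + 1 = ((ds.length : Nat) : Int) := by omega
    rw [e1]
    exact PySem.List.pyGet?_append_length ds [] c
  rw [eA, eB]

theorem digitChar_inj : ∀ a < 10, ∀ b < 10, (Nat.digitChar a = Nat.digitChar b ↔ a = b) := by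
  decide

theorem toDigits_getLast? (m : Nat) :
    (Nat.toDigits 10 m).getLast? = some (Nat.digitChar (m % 10)) := by
  rcases lt_or_ge m 10 with hm | hm
  · rw [Nat.toDigits_of_lt_base hm]
    simp [Nat.mod_eq_of_lt hm]
  · rw [Nat.toDigits_eq_if (by norm_num : (1:Nat) < 10), if_neg (by omega)]
    exact List.getLast?_concat

theorem cpChars_toDigits (v : Nat) : ∀ rep, cpChars (Nat.toDigits 10 v) rep = rep + pc v := by
  induction v using Nat.strong_induction_on with
  | _ v ih =>
    intro rep
    rcases lt_or_ge v 10 with hv | hv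
    · rw [Nat.toDigits_of_lt_base hv, cpChars_single, pc_lt10 hv]
      ring
    · have hne : Nat.toDigits 10 (v / 10) ≠ [] :=
        List.ne_nil_of_length_pos Nat.length_toDigits_pos
      rw [Nat.toDigits_eq_if (by norm_num : (1:Nat) < 10), if_neg (by omega),
        cpChars_append _ _ _ hne, toDigits_getLast?]
      have hiff := digitChar_inj (v / 10 % 10) (Nat.mod_lt _ (by norm_num))
        (v % 10) (Nat.mod_lt _ (by norm_num))
      simp only [Option.some.injEq, hiff]
      rw [ih (v / 10) (by omega) rep, pc_ge10 hv]
      by_cases hc : v / 10 % 10 = v % 10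
      · rw [if_pos hc, if_pos hc.symm]; ring
      · rw [if_neg hc, if_neg (fun e => hc e.symm)]; ring

theorem toChars_natCast (m : Nat) : PySem.Int.toChars (m : Int) = Nat.toDigits 10 m := by
  simp [PySem.Int.toChars]

theorem toStr_eq_zero_iff (m : Nat) : PySem.Int.toStr (m : Int) = "0" ↔ m = 0 := by
  constructor
  · intro he
    have ht : (PySem.Int.toStr (m : Int)).toList = "0".toList := by rw [he]
    rw [PySem.Int.toList_toStr, toChars_natCast] at ht
    have h0 : "0".toList = ['0'] := by decide
    rw [h0] at ht
    rcases lt_or_ge m 10 with hm | hm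
    · rw [Nat.toDigits_of_lt_base hm] at ht
      have hd : Nat.digitChar m = '0' := by simpa using ht
      have : Nat.digitChar m = Nat.digitChar 0 := by rw [hd]; rfl
      exact (digitChar_inj m hm 0 (by norm_num)).mp this
    · exfalso
      rw [Nat.toDigits_eq_if (by norm_num : (1:Nat) < 10), if_neg (by omega)] at ht
      have hlen : (Nat.toDigits 10 (m / 10)).length + 1 = 1 := by
        simpa using congrArg List.length ht
      have hp : 0 < (Nat.toDigits 10 (m / 10)).length := Nat.length_toDigits_pos
      omega
  · intro he
    subst he
    decide

theorem aLoop_succ (fuel : Nat) (num rep : Int) :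
    aLoop (fuel + 1) num rep =
      (if PySem.Int.toStr (num - 1) = "0" then aCountPairs (PySem.Int.toStr num) rep
       else aLoop fuel (num - 1) (aCountPairs (PySem.Int.toStr num) rep)) := rfl

theorem aCountPairs_toStr (m : Nat) (rep : Int) :
    aCountPairs (PySem.Int.toStr (m : Int)) rep = rep + pc m := by
  rw [aCountPairs_eq, PySem.Int.toList_toStr, toChars_natCast, cpChars_toDigits]

theorem aLoop_eq (N : Nat) (h : 1 ≤ N) :
    ∀ rep, aLoop N (N : Int) rep = rep + S N := by
  induction N, h using Nat.le_induction with
  | base =>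
    intro rep
    rw [show (1 : Nat) = 0 + 1 from rfl, aLoop_succ]
    norm_num
    rw [if_pos (by decide : PySem.Int.toStr 0 = "0")]
    rw [show (1 : Int) = ((1 : Nat) : Int) from by norm_num, aCountPairs_toStr]
    simp [S, pc_lt10]
  | succ n hn ih =>
    intro rep
    rw [aLoop_succ]
    rw [show ((n + 1 : Nat) : Int) - 1 = ((n : Nat) : Int) from by omega]
    rw [if_neg (fun he => by have := (toStr_eq_zero_iff n).mp he; omega)]
    rw [aCountPairs_toStr, ih]
    simp [S]
    ring

-- B-side invariant: after the fold has consumed range(10, m), total = S (m-1),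
-- the table has its original length and holds pc k at every k < m.
theorem bFold_inv (num : Int) (m : Nat) (h10 : 10 ≤ m) (hm : m ≤ (num + 1).toNat) :
    (((PySem.List.pyRange 10 (m : Int) 1).foldl bStep
        (0, List.replicate (num + 1).toNat 0)).1 = S (m - 1)) ∧
    (((PySem.List.pyRange 10 (m : Int) 1).foldl bStep
        (0, List.replicate (num + 1).toNat 0)).2.length = (num + 1).toNat) ∧
    (∀ k < m, (((PySem.List.pyRange 10 (m : Int) 1).foldl bStep
        (0, List.replicate (num + 1).toNat 0)).2.getD k 0 = pc k)) := by
  induction m, h10 using Nat.le_induction with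
  | base =>
    rw [PySem.List.pyRange_one_eq_nil (by norm_num)]
    simp only [List.foldl_nil]
    refine ⟨by norm_num [S_le9], by simp, ?_⟩
    intro k hk
    rw [List.getD_replicate _ (by omega)]
    exact (pc_lt10 hk).symm
  | succ m hm10 ih =>
    obtain ⟨ih1, ih2, ih3⟩ := ih (by omega)
    rw [show ((m + 1 : Nat) : Int) = ((m : Nat) : Int) + 1 from by push_cast; ring,
      PySem.List.pyRange_one_succ_right (by omega), List.foldl_append,
      List.foldl_cons, List.foldl_nil]
    have hq : PySem.Int.floordiv ((m : Nat) : Int) 10 = ((m / 10 : Nat) : Int) := by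
      exact_mod_cast PySem.Int.floordiv_natCast m 10
    have hd : PySem.Int.mod ((m : Nat) : Int) 10 = ((m % 10 : Nat) : Int) := by
      exact_mod_cast PySem.Int.mod_natCast m 10
    have hq10 : PySem.Int.mod ((m / 10 : Nat) : Int) 10 = ((m / 10 % 10 : Nat) : Int) := by
      exact_mod_cast PySem.Int.mod_natCast (m / 10) 10
    simp only [bStep, hq, hd, hq10, PySem.List.pyGetD_natCast, PySem.List.pySetD_natCast]
    have hp : ((PySem.List.pyRange 10 ((m : Nat) : Int) 1).foldl bStep
          (0, List.replicate (num + 1).toNat 0)).2.getD (m / 10) 0 +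
        (if ((m % 10 : Nat) : Int) = ((m / 10 % 10 : Nat) : Int) then (1 : Int) else 0) = pc m := by
      simp only [Nat.cast_inj]
      rw [ih3 (m / 10) (by omega), pc_ge10 hm10]
    refine ⟨?_, ?_, ?_⟩
    · rw [hp, ih1, show (m + 1 - 1 : Nat) = m from rfl]
      exact (S_succ' (by omega)).symm
    · rw [List.length_set, ih2]
    · intro k hk
      rw [List.getD_eq_getElem?_getD, List.getElem?_set]
      by_cases hkm : m = k
      · subst hkm
        rw [if_pos rfl, if_pos (by omega)]
        simpa using hp
      · rw [if_neg hkm, ← List.getD_eq_getElem?_getD]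
        exact ih3 k (by omega)

theorem alt_eq_S (num : Int) (h : 1 ≤ num) : FindRepeatedDigits_alt num = S num.toNat := by
  unfold FindRepeatedDigits_alt
  by_cases hle : num + 1 ≤ 10
  · rw [PySem.List.pyRange_one_eq_nil hle]
    simp
    exact (S_le9 (by omega)).symm
  · have hcast : num + 1 = ((num.toNat + 1 : Nat) : Int) := by omega
    have hb := (bFold_inv num (num.toNat + 1) (by omega) (by omega)).1
    rw [← hcast] at hb
    simpa using hb

-- ===== VERDICT (by name: the statement is the Claim_ definition above) =====
theorem FindRepeatedDigits_spec : Claim_equal_FindRepeatedDigits := by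
  intro num _ hpre
  unfold Spec_FindRepeatedDigits
  have hp1 : (1 : Int) ≤ num := hpre
  have hN : num = (num.toNat : Int) := by omega
  have h1 : 1 ≤ num.toNat := by omega
  calc FindRepeatedDigits num = aLoop num.toNat num 0 := rfl
    _ = 0 + S num.toNat := by rw [hN]; exact aLoop_eq _ h1 0
    _ = S num.toNat := by ring
    _ = FindRepeatedDigits_alt num := (alt_eq_S num hp1).symm
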